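-- pv_equiv track=rewrite | github.com/zunayed/puzzles_data_structures_and_algorithms | advent_of_code_2017/day_1.py | part1
-- ===== SOURCE A (Python) =====
-- def part1(input):
--     """
--     input: string of digits
--     output: sum of repeating nums
--     """
--     if not input:
--         return 0
--
--     count = 0
--
--     for i in range(len(input)):
--         if input[i] == input[i - 1]:
--             count += int(input[i])
--
--     return count
-- ===== SOURCE B (Python) =====
-- def part1(input):
--     """
--     input: string of digits
--     output: sum of repeating nums
--     """
--     if not input:
--         return 0
--
--     # run-length scan: a run of L equal characters contributes (L-1) interior
--     # adjacent matches; the circular wraparound is a separate term.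
--     total = 0
--     run_char = input[0]
--     run_len = 1
--     for c in input[1:]:
--         if c == run_char:
--             run_len += 1
--         else:
--             if run_len > 1:
--                 total += (run_len - 1) * int(run_char)
--             run_char = c
--             run_len = 1
--     if run_len > 1:
--         total += (run_len - 1) * int(run_char)
--
--     if input[0] == input[-1]:
--         total += int(input[0])
--
--     return total
-- ===== Notes on version B (the rewrite author's own statement) =====
-- stated objective: alternative
-- what changed: Replaces the per-index loop comparing input[i] with input[i-1] (circular via negative index) by a run-length scan that adds (L-1)*digit per run of equal characters, with the circular wraparound handled as a separate standalone term; int() is called once per run instead of once per match.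
import Mathlib
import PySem

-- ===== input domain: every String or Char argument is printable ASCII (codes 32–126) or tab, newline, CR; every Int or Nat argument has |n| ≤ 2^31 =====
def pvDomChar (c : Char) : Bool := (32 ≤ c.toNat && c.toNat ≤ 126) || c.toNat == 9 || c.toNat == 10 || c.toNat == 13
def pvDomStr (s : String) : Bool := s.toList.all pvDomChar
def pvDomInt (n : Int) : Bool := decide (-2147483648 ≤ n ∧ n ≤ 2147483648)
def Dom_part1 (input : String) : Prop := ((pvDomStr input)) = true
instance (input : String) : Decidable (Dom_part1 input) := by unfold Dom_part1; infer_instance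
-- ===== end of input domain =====

-- B replaces A's per-index circular-comparison loop by a run-length scan plus a standalone wraparound term (alternative decomposition, same cost).


-- ===== PORT A =====
-- int(c) for a one-character string, totalised with 0 where Python raises (excluded by Pre_)
def pvDigit (c : Char) : Int := (PySem.Int.ofChars? [c]).getD 0

def part1 (input : String) : Int :=
  let cs := input.toList
  if cs = [] then 0
  else
    (PySem.List.pyRange 0 (cs.length : Int) 1).foldl
      (fun count i =>
        if PySem.List.pyGetD cs i ' ' = PySem.List.pyGetD cs (i - 1) ' '
        then count + pvDigit (PySem.List.pyGetD cs i ' ')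
        else count) 0

-- ===== PORT B =====
def part1_alt (input : String) : Int :=
  match input.toList with
  | [] => 0
  | c :: rest =>
    let st := rest.foldl
      (fun (st : Int × Char × Int) ch =>
        if ch = st.2.1 then (st.1, st.2.1, st.2.2 + 1)
        else ((if st.2.2 > 1 then st.1 + (st.2.2 - 1) * pvDigit st.2.1 else st.1), ch, (1 : Int)))
      ((0 : Int), c, (1 : Int))
    let total := if st.2.2 > 1 then st.1 + (st.2.2 - 1) * pvDigit st.2.1 else st.1
    if c = PySem.List.pyGetD (c :: rest) (-1) ' ' then total + pvDigit c else total

-- ===== PRECONDITION & SPEC =====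
-- Pre_ excludes exactly the inputs where some position matches its (circular) predecessor
-- but is not a decimal digit: there Python's int() raises ValueError in both programs.
def Pre_part1 (input : String) : Prop :=
  ∀ k ∈ List.range input.toList.length,
    (input.toList.getD k ' ' =
      (if k = 0 then input.toList.getLastD ' ' else input.toList.getD (k - 1) ' ')) →
    (input.toList.getD k ' ').isDigit = true
instance (input : String) : Decidable (Pre_part1 input) := by unfold Pre_part1; infer_instance

def pvWitness_part1 : String := "1122a"

def Spec_part1 (input : String) (out : Int) : Prop := out = part1_alt input
instance (input : String) (out : Int) : Decidable (Spec_part1 input out) := by unfold Spec_part1; infer_instance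

-- ===== CLAIM (what is proved, stated in full; the proofs are below) =====
def Claim_equal_part1 : Prop := ∀ (input : String), Dom_part1 input → Pre_part1 input → Spec_part1 input (part1 input)

-- ===== LEMMAS AND PROOFS =====

-- sum of digit values at interior adjacent matches, previous char threaded through
def pvAdj (p : Char) (l : List Char) : Int :=
  match l with
  | [] => 0
  | c :: cs => (if c = p then pvDigit c else 0) + pvAdj c cs

-- B's run-length loop plus its final flush computes pvAdj
theorem pvB_loop (l : List Char) (t : Int) (rc : Char) (rl : Int) (h : 1 ≤ rl) :
    (if (l.foldl (fun (st : Int × Char × Int) ch =>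
        if ch = st.2.1 then (st.1, st.2.1, st.2.2 + 1)
        else ((if st.2.2 > 1 then st.1 + (st.2.2 - 1) * pvDigit st.2.1 else st.1), ch, (1 : Int))) (t, rc, rl)).2.2 > 1
     then (l.foldl (fun (st : Int × Char × Int) ch =>
        if ch = st.2.1 then (st.1, st.2.1, st.2.2 + 1)
        else ((if st.2.2 > 1 then st.1 + (st.2.2 - 1) * pvDigit st.2.1 else st.1), ch, (1 : Int))) (t, rc, rl)).1
          + ((l.foldl (fun (st : Int × Char × Int) ch =>
        if ch = st.2.1 then (st.1, st.2.1, st.2.2 + 1)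
        else ((if st.2.2 > 1 then st.1 + (st.2.2 - 1) * pvDigit st.2.1 else st.1), ch, (1 : Int))) (t, rc, rl)).2.2 - 1)
            * pvDigit (l.foldl (fun (st : Int × Char × Int) ch =>
        if ch = st.2.1 then (st.1, st.2.1, st.2.2 + 1)
        else ((if st.2.2 > 1 then st.1 + (st.2.2 - 1) * pvDigit st.2.1 else st.1), ch, (1 : Int))) (t, rc, rl)).2.1
     else (l.foldl (fun (st : Int × Char × Int) ch =>
        if ch = st.2.1 then (st.1, st.2.1, st.2.2 + 1)
        else ((if st.2.2 > 1 then st.1 + (st.2.2 - 1) * pvDigit st.2.1 else st.1), ch, (1 : Int))) (t, rc, rl)).1)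
    = t + (rl - 1) * pvDigit rc + pvAdj rc l := by
  induction l generalizing t rc rl with
  | nil =>
      simp only [List.foldl_nil, pvAdj]
      split_ifs with h1
      · ring
      · have : rl = 1 := by omega
        simp [this]
  | cons x l' ih =>
      simp only [List.foldl_cons, pvAdj]
      by_cases hx : x = rc
      · simp only [if_pos hx]
        rw [ih _ _ _ (by omega)]
        subst hx
        ring
      · simp only [if_neg hx]
        rw [ih _ _ _ (by omega)]
        have hflush : (if rl > 1 then t + (rl - 1) * pvDigit rc else t) = t + (rl - 1) * pvDigit rc := by
          split_ifs with h1
          · rfl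
          · have : rl = 1 := by omega
            simp [this]
        rw [hflush]
        simp

-- A's interior sum (indices 1..n-1 read as getD at k and k-1) is pvAdj
theorem pvA_sum (p : Char) (l : List Char) :
    ((List.range l.length).map
      (fun k => if l.getD k ' ' = (p :: l).getD k ' ' then pvDigit (l.getD k ' ') else 0)).sum
    = pvAdj p l := by
  induction l generalizing p with
  | nil => simp [pvAdj]
  | cons x l' ih =>
      rw [List.length_cons, List.range_succ_eq_map]
      simp only [List.map_cons, List.map_map, List.sum_cons]
      have : ((List.range l'.length).map
          ((fun k => if (x :: l').getD k ' ' = (p :: x :: l').getD k ' '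
                     then pvDigit ((x :: l').getD k ' ') else 0) ∘ (· + 1))).sum
          = pvAdj x l' := by
        rw [← ih x]
        apply congrArg List.sum
        apply List.map_congr_left
        intro k _
        simp [Function.comp]
      rw [this]
      simp [pvAdj]

-- ===== VERDICT (by name: the statement is the Claim_ definition above) =====
theorem part1_main (input : String) : part1 input = part1_alt input := by
  unfold part1 part1_alt
  cases hcs : input.toList with
  | nil => simp
  | cons c rest =>
      have hne : (c :: rest : List Char) ≠ [] := by simp
      simp only [reduceCtorEq, if_false]
      -- A: peel off the i = 0 (wraparound) iteration
      rw [PySem.List.pyRange_one_cons (by simp), List.foldl_cons]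
      -- A: the remaining index loop is a sum over the interior positions
      rw [PySem.List.foldl_congr_mem _ _
        (fun count i => count +
          (if PySem.List.pyGetD (c :: rest) i ' ' = PySem.List.pyGetD (c :: rest) (i - 1) ' '
           then pvDigit (PySem.List.pyGetD (c :: rest) i ' ') else 0)) _
        (by intro acc x _
            by_cases h : PySem.List.pyGetD (c :: rest) x ' ' = PySem.List.pyGetD (c :: rest) (x - 1) ' ' <;>
              simp [h])]
      rw [PySem.List.foldl_add]
      simp only [zero_add, zero_sub]
      rw [PySem.List.pyRange_one 1, List.map_map]
      have hlen : ((c :: rest : List Char).length - 1 : Int).toNat = rest.length := by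
        simp
      rw [hlen]
      have hmap : (List.range rest.length).map
          ((fun i => if PySem.List.pyGetD (c :: rest) i ' ' = PySem.List.pyGetD (c :: rest) (i - 1) ' '
                     then pvDigit (PySem.List.pyGetD (c :: rest) i ' ') else 0) ∘ (fun k : Nat => (1 : Int) + k))
          = (List.range rest.length).map
          (fun k => if rest.getD k ' ' = (c :: rest).getD k ' ' then pvDigit (rest.getD k ' ') else 0) := by
        apply List.map_congr_left
        intro k _
        have h1 : (1 : Int) + (k : Int) = ((k + 1 : Nat) : Int) := by push_cast; ring
        have h2 : ((k + 1 : Nat) : Int) - 1 = ((k : Nat) : Int) := by push_cast; ring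
        simp only [Function.comp, h1, h2, PySem.List.pyGetD_natCast, List.getD_cons_succ]
      rw [hmap, pvA_sum]
      -- B: the run-length loop computes the interior sum
      rw [pvB_loop rest 0 c 1 (le_refl 1)]
      -- both sides: wraparound term
      rw [PySem.List.pyGetD_zero_cons, PySem.List.pyGetD_neg_one _ _ hne]
      split_ifs with h
      · ring
      · ring

-- ===== VERDICT (by name: the statement is the Claim_ definition above) =====
theorem part1_spec : Claim_equal_part1 := by
  intro input _ _
  exact part1_main input
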